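-- pv_equiv track=rewrite | github.com/lewmas1/IR-to-FuncGroups | image_processing.py | remove_duplicate_x
-- ===== SOURCE A (Python) =====
-- def remove_duplicate_x(spectrum):
--     result = []
--     i = 0
--     while i < len(spectrum):
--         x, y = spectrum[i]
--         max_y = y
--         max_j = i
--         j = i + 1
--         while j < len(spectrum) and spectrum[j][0] == x:
--             if spectrum[j][1] > max_y:
--                 max_y = spectrum[j][1]
--                 max_j = j
--             j += 1
--         result.append(spectrum[max_j])
--         i = j
--     return result
-- ===== SOURCE B (Python) =====
-- def remove_duplicate_x(spectrum):
--     # Single pass: merge each point into the last result entry when its x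
--     # matches; replace it only on strictly greater y (keeps the first max).
--     result = []
--     for p in spectrum:
--         if result and result[-1][0] == p[0]:
--             if p[1] > result[-1][1]:
--                 result[-1] = p
--         else:
--             result.append(p)
--     return result
-- ===== Notes on version B (the rewrite author's own statement) =====
-- stated objective: simpler
-- what changed: Replaced the two-index nested run-scanning loop with a single pass that merges each point into the last result entry (replacing it only on strictly greater y).
import Mathlib
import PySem

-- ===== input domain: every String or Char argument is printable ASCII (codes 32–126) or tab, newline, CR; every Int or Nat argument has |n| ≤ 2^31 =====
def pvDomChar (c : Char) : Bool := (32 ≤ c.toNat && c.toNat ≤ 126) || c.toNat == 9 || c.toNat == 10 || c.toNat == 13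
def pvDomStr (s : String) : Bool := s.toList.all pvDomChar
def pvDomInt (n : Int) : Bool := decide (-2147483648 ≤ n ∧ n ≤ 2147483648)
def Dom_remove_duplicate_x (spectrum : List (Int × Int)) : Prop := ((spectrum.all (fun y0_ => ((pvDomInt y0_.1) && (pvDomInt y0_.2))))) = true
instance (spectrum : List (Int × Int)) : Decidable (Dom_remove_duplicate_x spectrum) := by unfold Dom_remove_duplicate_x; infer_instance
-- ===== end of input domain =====

-- B replaces A's nested two-index run-scanning with a single pass that merges each
-- point into the last result entry (objective: simpler; same O(n) cost).

-- ===== PORT A =====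
-- inner while loop of A: scans j forward while spectrum[j][0] == x, tracking max_y/max_j;
-- returns the final (max_j, j). The fuel argument is only a structural totality guard:
-- it is always called with fuel ≥ sp.length - j, so the fuel-exhaustion branch
-- (which returns the loop state exactly as loop exit does) is never reached.
def pvInnerA (sp : List (Int × Int)) (x : Int) : Nat → Nat → Int → Nat → Nat × Nat
  | 0, j, _max_y, max_j => (max_j, j)
  | fuel + 1, j, max_y, max_j =>
    if j < sp.length then
      if (sp.getD j (0, 0)).1 = x then
        if (sp.getD j (0, 0)).2 > max_y then pvInnerA sp x fuel (j + 1) (sp.getD j (0, 0)).2 j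
        else pvInnerA sp x fuel (j + 1) max_y max_j
      else (max_j, j)
    else (max_j, j)

-- outer while loop of A (fuel ≥ sp.length - i suffices: i strictly increases each pass)
def pvOuterA (sp : List (Int × Int)) : Nat → Nat → List (Int × Int)
  | 0, _i => []
  | fuel + 1, i =>
    if i < sp.length then
      sp.getD (pvInnerA sp (sp.getD i (0, 0)).1 sp.length (i + 1) (sp.getD i (0, 0)).2 i).1 (0, 0)
        :: pvOuterA sp fuel (pvInnerA sp (sp.getD i (0, 0)).1 sp.length (i + 1) (sp.getD i (0, 0)).2 i).2
    else []

def remove_duplicate_x (spectrum : List (Int × Int)) : List (Int × Int) :=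
  pvOuterA spectrum spectrum.length 0

-- ===== PORT B =====
-- one step of B's single pass: result is kept reversed (head = Python's result[-1])
def pvAltStep (acc : List (Int × Int)) (p : Int × Int) : List (Int × Int) :=
  match acc with
  | q :: qs => if q.1 = p.1 then (if p.2 > q.2 then p :: qs else q :: qs) else p :: q :: qs
  | [] => [p]

def remove_duplicate_x_alt (spectrum : List (Int × Int)) : List (Int × Int) :=
  (spectrum.foldl pvAltStep []).reverse

-- ===== PRECONDITION & SPEC =====
def Spec_remove_duplicate_x (spectrum : List (Int × Int)) (out : List (Int × Int)) : Prop := out = remove_duplicate_x_alt spectrum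
instance (spectrum : List (Int × Int)) (out : List (Int × Int)) : Decidable (Spec_remove_duplicate_x spectrum out) := by unfold Spec_remove_duplicate_x; infer_instance

-- ===== CLAIM (what is proved, stated in full; the proofs are below) =====
def Claim_equal_remove_duplicate_x : Prop := ∀ (spectrum : List (Int × Int)), Dom_remove_duplicate_x spectrum → Spec_remove_duplicate_x spectrum (remove_duplicate_x spectrum)

-- ===== LEMMAS AND PROOFS =====

-- the "first maximal element" step shared by both characterisations
def pvStep (b q : Int × Int) : Int × Int := if q.2 > b.2 then q else b

-- run-based reference function (fuel-guarded): both ports are proved equal to it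
def pvSpecF : Nat → List (Int × Int) → List (Int × Int)
  | 0, _ => []
  | _, [] => []
  | fuel + 1, p :: rest =>
    ((rest.takeWhile (fun q => q.1 == p.1)).foldl pvStep p)
      :: pvSpecF fuel (rest.dropWhile (fun q => q.1 == p.1))

-- pvSpecF is fuel-insensitive once fuel ≥ length
theorem pvSpecF_fuel :
    ∀ (k k' : Nat) (l : List (Int × Int)), l.length ≤ k → l.length ≤ k' →
      pvSpecF k l = pvSpecF k' l := by
  have hnil : ∀ (k : Nat), pvSpecF k [] = [] := by
    intro k; cases k <;> rfl
  intro k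
  induction k with
  | zero =>
    intro k' l hk _
    have : l = [] := List.length_eq_zero_iff.mp (by omega)
    subst this
    rw [hnil, hnil]
  | succ k ih =>
    intro k' l hk hk'
    match l, k' with
    | [], _ => rw [hnil, hnil]
    | p :: rest, 0 => simp at hk'
    | p :: rest, k'' + 1 =>
      simp only [pvSpecF]
      congr 1
      exact ih k'' _ (le_trans (List.length_dropWhile_le _ _) (by simpa using hk))
        (le_trans (List.length_dropWhile_le _ _) (by simpa using hk'))

theorem drop_takeWhile_length {α : Type} (p : α → Bool) :
    ∀ (l : List α), l.drop (l.takeWhile p).length = l.dropWhile p := by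
  intro l
  induction l with
  | nil => rfl
  | cons a t ih =>
    by_cases h : p a = true
    · simp [h, ih]
    · simp [h]

theorem drop_cons_head (sp : List (Int × Int)) (j : Nat) (q : Int × Int)
    (t : List (Int × Int)) (h : sp.drop j = q :: t) :
    j < sp.length ∧ sp.getD j (0,0) = q ∧ sp.drop (j+1) = t := by
  have hq : sp[j]? = some q := by
    have := @List.getElem?_drop _ sp j 0
    rw [h] at this; simpa using this.symm
  refine ⟨?_, ?_, ?_⟩
  · exact (List.getElem?_eq_some_iff.mp hq).1
  · simp [List.getD_eq_getElem?_getD, hq]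
  · have : (sp.drop j).drop 1 = t := by rw [h]; rfl
    rwa [List.drop_drop] at this

-- A's inner loop computes the index just past the run and the run's first-max element
theorem pvInnerA_spec (sp : List (Int × Int)) (x : Int) :
    ∀ (tail : List (Int × Int)) (k j : Nat) (my : Int) (mj : Nat) (best : Int × Int),
      sp.drop j = tail → tail.length ≤ k → sp.getD mj (0,0) = best → best.2 = my →
      (pvInnerA sp x k j my mj).2 = j + (tail.takeWhile (fun q => q.1 == x)).length ∧
      sp.getD (pvInnerA sp x k j my mj).1 (0,0) =
        (tail.takeWhile (fun q => q.1 == x)).foldl pvStep best := by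
  intro tail
  induction tail with
  | nil =>
    intro k j my mj best hdrop _ hbest hy
    have hj : ¬ j < sp.length := by
      have := List.drop_eq_nil_iff.mp hdrop; omega
    match k with
    | 0 => simpa [pvInnerA] using hbest
    | k + 1 =>
      rw [pvInnerA, if_neg hj]
      simpa using hbest
  | cons q t ih =>
    intro k j my mj best hdrop hk hbest hy
    obtain ⟨hj, hget, hdrop'⟩ := drop_cons_head sp j q t hdrop
    match k with
    | 0 => simp at hk
    | k + 1 =>
      rw [pvInnerA, if_pos hj, hget]
      by_cases hq : q.1 = x
      · rw [if_pos hq]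
        have htw : (q :: t).takeWhile (fun r => r.1 == x) =
            q :: t.takeWhile (fun r => r.1 == x) := by
          simp [hq]
        by_cases hgt : q.2 > my
        · rw [if_pos hgt]
          obtain ⟨h1, h2⟩ := ih k (j+1) q.2 j q hdrop' (by simpa using hk) hget rfl
          constructor
          · rw [h1, htw]; simp; omega
          · rw [h2, htw]
            have : pvStep best q = q := by unfold pvStep; rw [if_pos (by omega)]
            simp [List.foldl_cons, this]
        · rw [if_neg hgt]
          obtain ⟨h1, h2⟩ := ih k (j+1) my mj best hdrop' (by simpa using hk) hbest hy
          constructor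
          · rw [h1, htw]; simp; omega
          · rw [h2, htw]
            have : pvStep best q = best := by unfold pvStep; rw [if_neg (by omega)]
            simp [List.foldl_cons, this]
      · rw [if_neg hq]
        have htw : (q :: t).takeWhile (fun r => r.1 == x) = [] := by
          simp [hq]
        rw [htw]
        simpa using hbest

theorem outer_eq_specF (sp : List (Int × Int)) :
    ∀ (n i : Nat), sp.length - i ≤ n →
      pvOuterA sp n i = pvSpecF (sp.length - i) (sp.drop i) := by
  intro n
  induction n with
  | zero =>
    intro i hn
    have hi : ¬ i < sp.length := by omega
    have h0 : sp.length - i = 0 := by omega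
    rw [h0]
    rfl
  | succ n ih =>
    intro i hn
    by_cases hi : i < sp.length
    · rw [pvOuterA, if_pos hi]
      have hdrop : sp.drop i = sp.getD i (0,0) :: sp.drop (i+1) := by
        rw [List.drop_eq_getElem_cons hi]
        simp [List.getD_eq_getElem?_getD, List.getElem?_eq_getElem hi]
      obtain ⟨h1, h2⟩ := pvInnerA_spec sp (sp.getD i (0,0)).1 (sp.drop (i+1)) sp.length (i+1)
        (sp.getD i (0,0)).2 i (sp.getD i (0,0)) rfl (by simp) rfl rfl
      have hsum : ((sp.drop (i+1)).takeWhile (fun q => q.1 == (sp.getD i (0,0)).1)).length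
          + ((sp.drop (i+1)).dropWhile (fun q => q.1 == (sp.getD i (0,0)).1)).length
          = sp.length - (i+1) := by
        rw [← List.length_append, List.takeWhile_append_dropWhile, List.length_drop]
      have hdd : sp.drop (i + 1 +
          ((sp.drop (i+1)).takeWhile (fun q => q.1 == (sp.getD i (0,0)).1)).length)
          = (sp.drop (i+1)).dropWhile (fun q => q.1 == (sp.getD i (0,0)).1) := by
        rw [← drop_takeWhile_length (fun q => q.1 == (sp.getD i (0,0)).1) (sp.drop (i+1)),
          List.drop_drop]
      have hlen : sp.length - i = (sp.length - (i+1)) + 1 := by omega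
      rw [ih _ (by omega), h1, hdd, hlen, hdrop, pvSpecF, ← h2]
      congr 1
      apply pvSpecF_fuel <;> omega
    · have h0 : sp.length - i = 0 := by omega
      rw [pvOuterA, if_neg hi, h0]
      rfl

theorem foldl_alt :
    ∀ (n : Nat) (l : List (Int × Int)) (b : Int × Int) (rs : List (Int × Int)),
      l.length ≤ n →
      List.foldl pvAltStep (b :: rs) l =
        (((l.takeWhile (fun q => q.1 == b.1)).foldl pvStep b)
          :: pvSpecF (l.dropWhile (fun q => q.1 == b.1)).length
               (l.dropWhile (fun q => q.1 == b.1))).reverse ++ rs := by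
  intro n
  induction n with
  | zero =>
    intro l b rs hn
    have : l = [] := List.length_eq_zero_iff.mp (by omega)
    subst this
    simp [pvSpecF]
  | succ n ih =>
    intro l b rs hn
    match l with
    | [] => simp [pvSpecF]
    | q :: t =>
      by_cases hq : q.1 = b.1
      · have hq' : b.1 = q.1 := hq.symm
        have hstep : pvAltStep (b :: rs) q = pvStep b q :: rs := by
          simp [pvAltStep, pvStep, hq']
          split <;> rfl
        have hb1 : (pvStep b q).1 = b.1 := by
          unfold pvStep; split
          · exact hq
          · rfl
        rw [List.foldl_cons, hstep,
          ih t (pvStep b q) rs (by simpa using Nat.lt_succ_iff.mp (by simpa using hn))]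
        simp only [hb1]
        have htw : (q :: t).takeWhile (fun r => r.1 == b.1) =
            q :: t.takeWhile (fun r => r.1 == b.1) := by
          simp [hq]
        have hdw : (q :: t).dropWhile (fun r => r.1 == b.1) =
            t.dropWhile (fun r => r.1 == b.1) := by
          simp [hq]
        rw [htw, hdw, List.foldl_cons]
      · have hq' : ¬ b.1 = q.1 := fun h => hq h.symm
        have hstep : pvAltStep (b :: rs) q = q :: b :: rs := by
          simp [pvAltStep, hq']
        rw [List.foldl_cons, hstep,
          ih t q (b :: rs) (by simpa using Nat.lt_succ_iff.mp (by simpa using hn))]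
        have htw : (q :: t).takeWhile (fun r => r.1 == b.1) = [] := by
          simp [hq]
        have hdw : (q :: t).dropWhile (fun r => r.1 == b.1) = q :: t := by
          simp [hq]
        have hY : pvSpecF (t.dropWhile (fun r => r.1 == q.1)).length
              (t.dropWhile (fun r => r.1 == q.1))
            = pvSpecF t.length (t.dropWhile (fun r => r.1 == q.1)) :=
          pvSpecF_fuel _ _ _ le_rfl (List.length_dropWhile_le _ _)
        rw [htw, hdw, hY]
        simp only [List.length_cons, pvSpecF]
        simp

theorem alt_eq_specF (l : List (Int × Int)) :
    remove_duplicate_x_alt l = pvSpecF l.length l := by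
  match l with
  | [] => simp [remove_duplicate_x_alt, pvSpecF]
  | p :: t =>
    unfold remove_duplicate_x_alt
    rw [List.foldl_cons]
    have hstep : pvAltStep [] p = [p] := rfl
    rw [hstep, foldl_alt t.length t p [] le_rfl]
    have hY : pvSpecF (t.dropWhile (fun r => r.1 == p.1)).length
          (t.dropWhile (fun r => r.1 == p.1))
        = pvSpecF t.length (t.dropWhile (fun r => r.1 == p.1)) :=
      pvSpecF_fuel _ _ _ le_rfl (List.length_dropWhile_le _ _)
    rw [hY]
    simp only [List.length_cons, pvSpecF]
    simp

-- ===== VERDICT (by name: the statement is the Claim_ definition above) =====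
theorem remove_duplicate_x_spec : Claim_equal_remove_duplicate_x := by
  intro sp _
  unfold Spec_remove_duplicate_x
  rw [alt_eq_specF]
  have := outer_eq_specF sp sp.length 0 (by omega)
  simpa [remove_duplicate_x] using this
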